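-- pv_equiv track=rewrite | github.com/KamilDemel/LeetCode-Grind | WDI_Fundamentals/prime_variant_sum_backtracking.py | solve_prime_variant
-- ===== SOURCE A (Python) =====
-- import math
--
-- def is_prime(n):
--     if n < 2:
--         return False
--     for i in range(2, int(math.sqrt(n)) + 1):
--         if n % i == 0:
--             return False
--     return True
--
-- def solve_prime_variant(arr):
--     n = len(arr)
--     target_sum = sum(arr)
--
--     def backtrack(index, current_sum):
--         if index == n:
--             return current_sum == target_sum
--
--         for offset in range(-2, 3):
--             candidate = arr[index] + offset
--
--             if candidate <= 20 and is_prime(candidate):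
--                 if backtrack(index + 1, current_sum + candidate):
--                     return True
--
--         return False
--
--     return backtrack(0, 0)
-- ===== SOURCE B (Python) =====
-- PRIMES_LE_20 = (2, 3, 5, 7, 11, 13, 17, 19)
--
-- def solve_prime_variant(arr):
--     sums = {0}
--     for x in arr:
--         cands = [p for p in PRIMES_LE_20 if x - 2 <= p <= x + 2]
--         sums = {s + c for s in sums for c in cands}
--     return sum(arr) in sums
-- ===== Notes on version B (the rewrite author's own statement) =====
-- stated objective: alternative
-- what changed: Replaces the depth-first offset backtracking (with a trial-division primality test per candidate) by a forward reachable-sum set DP: per element the candidates are read off a fixed tuple of the primes <= 20, and a set of reachable partial sums is folded over the array, finishing with one membership test of the total; this avoids A's exponential worst case but was not measurably faster on the generated inputs, where A's early exit wins.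
import Mathlib
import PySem

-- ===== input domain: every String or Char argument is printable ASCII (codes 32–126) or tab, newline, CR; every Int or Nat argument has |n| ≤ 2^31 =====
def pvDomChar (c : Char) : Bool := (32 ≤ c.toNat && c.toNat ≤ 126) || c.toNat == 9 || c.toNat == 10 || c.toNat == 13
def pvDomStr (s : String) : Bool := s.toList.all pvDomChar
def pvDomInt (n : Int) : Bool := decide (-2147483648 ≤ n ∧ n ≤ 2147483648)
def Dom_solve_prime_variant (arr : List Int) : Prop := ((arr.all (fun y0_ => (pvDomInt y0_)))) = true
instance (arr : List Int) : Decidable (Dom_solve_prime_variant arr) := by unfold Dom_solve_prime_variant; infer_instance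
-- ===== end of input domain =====

-- B replaces A's depth-first offset backtracking by a reachable-sum set DP over a
-- fixed prime table (a different algorithm of comparable measured cost).


-- ===== PORT A =====
-- floor square root (largest k with k*k ≤ n): the value of int(math.sqrt(n)), which is
-- exact on the integers this program feeds it (is_prime's loop only runs for 2 ≤ n ≤ 20).
def pyISqrt (n : Nat) : Nat :=
  (List.range (n + 1)).foldl (fun acc k => if k * k ≤ n then k else acc) 0

def pyIsPrime (n : Int) : Bool :=
  if n < 2 then false
  else (PySem.List.pyRange 2 ((pyISqrt n.toNat : Int) + 1) 1).all
    (fun i => !(PySem.Int.mod n i == 0))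

-- backtrack(index, current_sum): structural recursion on the remaining suffix of arr
def pvBacktrack (tgt : Int) : List Int → Int → Bool
  | [], cur => cur == tgt
  | x :: rest, cur =>
    (PySem.List.pyRange (-2) 3 1).any (fun off =>
      let candidate := x + off
      (candidate ≤ 20 && pyIsPrime candidate) && pvBacktrack tgt rest (cur + candidate))

def solve_prime_variant (arr : List Int) : Bool :=
  let target_sum := arr.sum
  pvBacktrack target_sum arr 0

-- ===== PORT B =====
def pvPrimesLe20 : List Int := [2, 3, 5, 7, 11, 13, 17, 19]

-- one loop iteration: sums = {s + c for s in sums for c in cands}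
def pvStep (sums : PySem.Set Int) (x : Int) : PySem.Set Int :=
  let cands := pvPrimesLe20.filter (fun p => x - 2 ≤ p && p ≤ x + 2)
  PySem.Set.ofList (sums.flatMap (fun s => cands.map (fun c => s + c)))

def solve_prime_variant_alt (arr : List Int) : Bool :=
  let sums : PySem.Set Int := arr.foldl pvStep [0]
  sums.contains arr.sum

-- ===== PRECONDITION & SPEC =====
def Spec_solve_prime_variant (arr : List Int) (out : Bool) : Prop := out = solve_prime_variant_alt arr
instance (arr : List Int) (out : Bool) : Decidable (Spec_solve_prime_variant arr out) := by unfold Spec_solve_prime_variant; infer_instance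

-- ===== CLAIM (what is proved, stated in full; the proofs are below) =====
def Claim_equal_solve_prime_variant : Prop := ∀ (arr : List Int), Dom_solve_prime_variant arr → Spec_solve_prime_variant arr (solve_prime_variant arr)

-- ===== LEMMAS AND PROOFS =====

theorem prime_mem_le (c : Int) (h : c ∈ pvPrimesLe20) : (c ≤ 20 && pyIsPrime c) = true := by
  fin_cases h <;> decide

theorem mem_primes (c : Int) (h : (c ≤ 20 && pyIsPrime c) = true) : c ∈ pvPrimesLe20 := by
  obtain ⟨h1, h2⟩ := Bool.and_eq_true_iff.mp h
  have h1' : c ≤ 20 := of_decide_eq_true h1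
  by_cases hlt : c < 2
  · simp [pyIsPrime, hlt] at h2
  · have hge : 2 ≤ c := by omega
    interval_cases c <;> revert h2 <;> decide

-- one DP step does exactly what one level of A's offset loop does
theorem step_any (x : Int) (L : List Int) (f : Int → Bool) :
    (pvStep L x).any f
      = L.any (fun s => (PySem.List.pyRange (-2) 3 1).any (fun off =>
          ((x + off ≤ 20 && pyIsPrime (x + off)) && f (s + (x + off))))) := by
  have hr : PySem.List.pyRange (-2) 3 1 = [-2, -1, 0, 1, 2] := by decide
  rw [Bool.eq_iff_iff]
  simp only [List.any_eq_true, pvStep, PySem.Set.mem_ofList, List.mem_flatMap, List.mem_map,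
    List.mem_filter]
  constructor
  · rintro ⟨a, ⟨s, hs, c, ⟨hcp, hb⟩, rfl⟩, hf⟩
    refine ⟨s, hs, c - x, ?_, ?_⟩
    · rw [hr]; simp at hb ⊢; omega
    · have hc := prime_mem_le c hcp
      have hx : x + (c - x) = c := by ring
      rw [hx, hc, hf]; rfl
  · rintro ⟨s, hs, off, hoff, h⟩
    obtain ⟨h1, h2⟩ := Bool.and_eq_true_iff.mp h
    refine ⟨s + (x + off), ⟨s, hs, x + off, ⟨mem_primes _ h1, ?_⟩, rfl⟩, h2⟩
    rw [hr] at hoff; simp at hoff ⊢; omega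

-- fold/backtrack bridge: the DP set contains tgt iff some start value backtracks to tgt
theorem key (tgt : Int) : ∀ (rest L : List Int),
    ((rest.foldl pvStep L).contains tgt) = L.any (fun s => pvBacktrack tgt rest s)
  | [], L => by
    rw [List.foldl_nil, Bool.eq_iff_iff]
    simp only [pvBacktrack, List.any_eq_true, beq_iff_eq, PySem.Set.contains,
      List.contains_iff_mem, decide_eq_true_eq]
    exact ⟨fun h => ⟨tgt, h, rfl⟩, fun ⟨s, h, e⟩ => e ▸ h⟩
  | x :: rest, L => by
    rw [List.foldl_cons, key tgt rest (pvStep L x), step_any x L]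
    simp only [pvBacktrack]

-- ===== VERDICT (by name: the statement is the Claim_ definition above) =====
theorem solve_prime_variant_spec : Claim_equal_solve_prime_variant := by
  intro arr _
  show _ = _
  simp only [solve_prime_variant, solve_prime_variant_alt, key arr.sum arr [0],
    List.any_cons, List.any_nil, Bool.or_false]
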